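-- pv_equiv track=rewrite | github.com/Hitstar53/CSS-Practicals | Exp1/Substitution-Techniques-Attack-2021300108/brute_force_polyalph.py | brute_force_poly_alphabetic_cipher
-- ===== SOURCE A (Python) =====
-- import itertools
--
-- def decrypt(ciphertext, key):
--     plaintext = []
--     ciphertext = ''.join(filter(str.isalpha, ciphertext.upper()))
--     key = key.upper()
--
--     for i in range(len(ciphertext)):
--         c = ciphertext[i]
--         k = key[i % len(key)]
--         decrypted_char = chr((ord(c) - ord(k) + 26) % 26 + ord('A'))
--         plaintext.append(decrypted_char)
--
--     return ''.join(plaintext)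
--
-- def brute_force_poly_alphabetic_cipher(ciphertext, expected_plaintext, max_key_length):
--     alphabet = "ABCDEFGHIJKLMNOPQRSTUVWXYZ"
--     for length in range(1, max_key_length + 1):
--         for key_tuple in itertools.product(alphabet, repeat=length):
--             key = ''.join(key_tuple)
--             decrypted_text = decrypt(ciphertext, key)
--             if decrypted_text == expected_plaintext:
--                 return key
--     return None
-- ===== SOURCE B (Python) =====
-- def brute_force_poly_alphabetic_cipher(ciphertext, expected_plaintext, max_key_length):
--     # Solve each key character directly from its residue-class constraints instead of
--     # enumerating all 26**L candidate keys; unconstrained positions take 'A' (the lex minimum).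
--     filtered = [c for c in ciphertext.upper() if c.isalpha()]
--     n = len(filtered)
--     if len(expected_plaintext) != n or any(not ('A' <= p <= 'Z') for p in expected_plaintext):
--         return None
--     shifts = [(ord(c) - ord(p)) % 26 for c, p in zip(filtered, expected_plaintext)]
--     limit = min(max_key_length, n if n > 0 else 1)
--     for L in range(1, limit + 1):
--         key_chars = []
--         ok = True
--         for j in range(L):
--             cls = [shifts[i] for i in range(j, n, L)]
--             if not cls:
--                 key_chars.append('A')
--             elif all(s == cls[0] for s in cls):
--                 key_chars.append(chr(cls[0] + ord('A')))
--             else: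
--                 ok = False
--                 break
--         if ok:
--             return ''.join(key_chars)
--     return None
-- ===== Notes on version B (the rewrite author's own statement) =====
-- stated objective: faster
-- what changed: Instead of enumerating all 26^L candidate keys for each length L, B solves each key character directly from its residue-class constraint ((ord(c)-ord(p)) % 26 per constrained position), fills unconstrained positions with 'A' (the lexicographic minimum A would pick), and caps the searched lengths at the filtered ciphertext length, where a hit is guaranteed.
import Mathlib
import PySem

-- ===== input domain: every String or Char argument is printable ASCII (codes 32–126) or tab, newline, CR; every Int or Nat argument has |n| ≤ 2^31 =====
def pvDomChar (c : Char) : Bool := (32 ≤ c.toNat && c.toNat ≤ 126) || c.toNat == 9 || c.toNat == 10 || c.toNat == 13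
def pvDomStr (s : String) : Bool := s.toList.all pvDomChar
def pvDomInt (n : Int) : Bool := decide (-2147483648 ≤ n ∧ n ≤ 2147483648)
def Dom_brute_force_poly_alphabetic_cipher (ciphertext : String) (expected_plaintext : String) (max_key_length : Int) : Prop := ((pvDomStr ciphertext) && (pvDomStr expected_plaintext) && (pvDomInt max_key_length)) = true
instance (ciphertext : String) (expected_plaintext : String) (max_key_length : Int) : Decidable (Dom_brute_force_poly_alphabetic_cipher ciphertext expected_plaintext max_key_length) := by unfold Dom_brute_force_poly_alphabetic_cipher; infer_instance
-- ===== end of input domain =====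

-- B solves each key character directly from its residue-class constraint instead of
-- enumerating all 26^L candidate keys per length (a different, asymptotically smaller search).

-- ===== PORT A =====
-- ''.join(filter(str.isalpha, ciphertext.upper())) — the same expression appears verbatim in B's python
def pvFiltered (s : String) : List Char :=
  (PySem.Chars.upper s.toList).filter PySem.Chars.isalpha

-- alphabet = "ABCDEFGHIJKLMNOPQRSTUVWXYZ", as its character list
def pvAlphabet : List Char :=
  ['A','B','C','D','E','F','G','H','I','J','K','L','M',
   'N','O','P','Q','R','S','T','U','V','W','X','Y','Z']

-- chr((ord(c) - ord(k) + 26) % 26 + ord('A'))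
def pvDecChar (c k : Char) : Char :=
  Char.ofNat ((PySem.Int.mod ((c.toNat : Int) - (k.toNat : Int) + 26) 26).toNat + 65)

-- decrypt(ciphertext, key), as the list of characters of the returned string
def pvDecrypt (ciphertext key : String) : List Char :=
  (List.range (pvFiltered ciphertext).length).map
    (fun i => pvDecChar ((pvFiltered ciphertext).getD i 'A')
      ((PySem.Chars.upper key.toList).getD (i % (PySem.Chars.upper key.toList).length) 'A'))

-- itertools.product(alphabet, repeat=L), in iteration order
def pvAllKeys : Nat → List (List Char)
  | 0 => [[]]
  | n + 1 => pvAlphabet.flatMap (fun c => (pvAllKeys n).map (fun w => c :: w))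

-- for length in range(1, max_key_length + 1): … (fuel = number of lengths still to try)
def pvTryLenA (ciphertext expected_plaintext : String) (l : Int) : Nat → Option String
  | 0 => none
  | Nat.succ f =>
    match (pvAllKeys l.toNat).find?
        (fun w => pvDecrypt ciphertext (String.ofList w) == expected_plaintext.toList) with
    | some w => some (String.ofList w)
    | none => pvTryLenA ciphertext expected_plaintext (l + 1) f

def brute_force_poly_alphabetic_cipher (ciphertext : String) (expected_plaintext : String) (max_key_length : Int) : Option String :=
  pvTryLenA ciphertext expected_plaintext 1 max_key_length.toNat

-- ===== PORT B =====
-- shifts = [(ord(c) - ord(p)) % 26 for c, p in zip(filtered, expected_plaintext)]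
def pvShifts (filtered ep : List Char) : List Int :=
  (filtered.zip ep).map (fun q => PySem.Int.mod ((q.1.toNat : Int) - (q.2.toNat : Int)) 26)

-- cls = [shifts[i] for i in range(j, n, L)]
def pvClass (shifts : List Int) (n L j : Int) : List Int :=
  (PySem.List.pyRange j n L).map (fun i => PySem.List.pyGetD shifts i 0)

-- empty class → 'A'; all constraints equal → chr(cls[0] + ord('A')); otherwise no key char fits
def pvClassChar (cls : List Int) : Option Char :=
  match cls with
  | [] => some 'A'
  | s0 :: _ => if cls.all (fun s => s == s0) then some (Char.ofNat (s0.toNat + 65)) else none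

-- inner loop over j in range(L), appending key chars, break-on-failure
def pvBuildKey (shifts : List Int) (n L : Int) : List Int → Option (List Char)
  | [] => some []
  | j :: js =>
    match pvClassChar (pvClass shifts n L j) with
    | some c => (pvBuildKey shifts n L js).map (c :: ·)
    | none => none

-- outer loop over L in range(1, limit + 1)
def pvTryLenB (shifts : List Int) (n : Int) : List Int → Option (List Char)
  | [] => none
  | L :: rest =>
    match pvBuildKey shifts n L (PySem.List.pyRange 0 L 1) with
    | some key => some key
    | none => pvTryLenB shifts n rest

def brute_force_poly_alphabetic_cipher_alt (ciphertext : String) (expected_plaintext : String) (max_key_length : Int) : Option String :=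
  if expected_plaintext.toList.length = (pvFiltered ciphertext).length
      ∧ ∀ p ∈ expected_plaintext.toList, 'A' ≤ p ∧ p ≤ 'Z' then
    (pvTryLenB (pvShifts (pvFiltered ciphertext) expected_plaintext.toList)
        ((pvFiltered ciphertext).length : Int)
        (PySem.List.pyRange 1
          (min max_key_length
              (if 0 < (pvFiltered ciphertext).length then ((pvFiltered ciphertext).length : Int) else 1) + 1) 1)).map
      String.ofList
  else none

-- ===== PRECONDITION & SPEC =====
def Spec_brute_force_poly_alphabetic_cipher (ciphertext : String) (expected_plaintext : String) (max_key_length : Int) (out : Option String) : Prop := out = brute_force_poly_alphabetic_cipher_alt ciphertext expected_plaintext max_key_length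
instance (ciphertext : String) (expected_plaintext : String) (max_key_length : Int) (out : Option String) : Decidable (Spec_brute_force_poly_alphabetic_cipher ciphertext expected_plaintext max_key_length out) := by unfold Spec_brute_force_poly_alphabetic_cipher; infer_instance

-- ===== CLAIM (what is proved, stated in full; the proofs are below) =====
def Claim_equal_brute_force_poly_alphabetic_cipher : Prop := ∀ (ciphertext : String) (expected_plaintext : String) (max_key_length : Int), Dom_brute_force_poly_alphabetic_cipher ciphertext expected_plaintext max_key_length → Spec_brute_force_poly_alphabetic_cipher ciphertext expected_plaintext max_key_length (brute_force_poly_alphabetic_cipher ciphertext expected_plaintext max_key_length)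

-- ===== LEMMAS AND PROOFS =====

-- the per-position predicate B solves: key char c fits every constraint of residue class j
def pvQ (shifts : List Int) (n L : Int) : Int → Char → Bool :=
  fun j c => (pvClass shifts n L j).all (fun s => ((c.toNat : Int) - 65) == s)

-- "key w (read from class offset j on) decrypts every constrained position correctly"
def pvMatchKey (Q : Int → Char → Bool) : Int → List Char → Bool
  | _, [] => true
  | j, c :: w => Q j c && pvMatchKey Q (j + 1) w

-- lexicographically-first key: one alphabet scan per position
def pvBuildKeyQ (Q : Int → Char → Bool) : List Int → Option (List Char)
  | [] => some []
  | j :: js =>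
    match pvAlphabet.find? (Q j) with
    | some c => (pvBuildKeyQ Q js).map (c :: ·)
    | none => none

lemma pv_char_eq_of_toNat {c d : Char} (h : c.toNat = d.toNat) : c = d := by
  have := congrArg Char.ofNat h
  rwa [Char.ofNat_toNat, Char.ofNat_toNat] at this

lemma pv_toNat_ofNat {n : Nat} (h : n ≤ 91) : (Char.ofNat n).toNat = n := by
  rw [Char.toNat_ofNat, if_pos]; constructor; omega

lemma pv_le_char_iff (a c : Char) : (a ≤ c) ↔ a.toNat ≤ c.toNat := by
  rw [Char.le_def, UInt32.le_iff_toNat_le]; rfl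

lemma pv_find?_congr {α : Type} {p q : α → Bool} {l : List α} (h : ∀ x ∈ l, p x = q x) :
    l.find? p = l.find? q := by
  induction l with
  | nil => rfl
  | cons a t ih =>
    simp only [List.find?_cons, h a (by simp)]
    cases q a <;> simp [ih (fun x hx => h x (by simp [hx]))]

lemma pv_mem_allKeys {w : List Char} {L : Nat} (h : w ∈ pvAllKeys L) :
    w.length = L ∧ ∀ c ∈ w, c ∈ pvAlphabet := by
  induction L generalizing w with
  | zero =>
    simp only [pvAllKeys, List.mem_singleton] at h
    subst h; simp
  | succ L ih =>
    simp only [pvAllKeys, List.mem_flatMap, List.mem_map] at h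
    obtain ⟨c, hc, w', hw', rfl⟩ := h
    obtain ⟨hl, hall⟩ := ih hw'
    refine ⟨by simp [hl], ?_⟩
    rintro d hd
    rcases List.mem_cons.1 hd with rfl | hd'
    · exact hc
    · exact hall d hd'

lemma pv_alphabet_range {c : Char} (h : c ∈ pvAlphabet) : 65 ≤ c.toNat ∧ c.toNat ≤ 90 := by
  fin_cases h <;> simp

lemma pv_upper_alphabet {w : List Char} (h : ∀ c ∈ w, c ∈ pvAlphabet) :
    PySem.Chars.upper w = w := by
  have key : ∀ c ∈ pvAlphabet, PySem.Chars.upperChar c = c := by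
    intro c hc
    have hb := pv_alphabet_range hc
    have hnl : ¬ ('a' ≤ c) := by
      rw [pv_le_char_iff]
      have ha : ('a').toNat = 97 := rfl
      omega
    have hl : PySem.Chars.islower c = false := by
      simp [PySem.Chars.islower, hnl]
    simp [PySem.Chars.upperChar, hl]
  simp only [PySem.Chars.upper]
  rw [List.map_congr_left (fun c hc => key c (h c hc))]
  exact List.map_id' w

lemma pv_decChar_upper (c k : Char) :
    65 ≤ (pvDecChar c k).toNat ∧ (pvDecChar c k).toNat ≤ 90 := by
  have h26 : (0:Int) < 26 := by norm_num
  unfold pvDecChar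
  rw [PySem.Int.mod_eq_emod_of_pos h26]
  have h1 : 0 ≤ ((c.toNat : Int) - (k.toNat : Int) + 26) % 26 := Int.emod_nonneg _ (by norm_num)
  have h2 : ((c.toNat : Int) - (k.toNat : Int) + 26) % 26 < 26 := Int.emod_lt_of_pos _ h26
  rw [pv_toNat_ofNat (by omega)]
  omega

-- the core arithmetic: a key character decrypts position i correctly iff it solves
-- the residue-class equation  k - 65 = (c - p) mod 26
lemma pv_decChar_eq_iff {c k p : Char}
    (hk : 65 ≤ k.toNat ∧ k.toNat ≤ 90) (hp : 65 ≤ p.toNat ∧ p.toNat ≤ 90) :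
    (pvDecChar c k = p) ↔
      ((k.toNat : Int) - 65 = PySem.Int.mod ((c.toNat : Int) - (p.toNat : Int)) 26) := by
  have h26 : (0:Int) < 26 := by norm_num
  have h1 : 0 ≤ ((c.toNat : Int) - (k.toNat : Int) + 26) % 26 := Int.emod_nonneg _ (by norm_num)
  have h2 : ((c.toNat : Int) - (k.toNat : Int) + 26) % 26 < 26 := Int.emod_lt_of_pos _ h26
  unfold pvDecChar
  rw [PySem.Int.mod_eq_emod_of_pos h26, PySem.Int.mod_eq_emod_of_pos h26]
  constructor
  · intro h
    have := congrArg Char.toNat h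
    rw [pv_toNat_ofNat (by omega)] at this
    omega
  · intro h
    apply pv_char_eq_of_toNat
    rw [pv_toNat_ofNat (by omega)]
    omega

lemma pv_matchKey_iff (Q : Int → Char → Bool) (w : List Char) (j : Int) :
    pvMatchKey Q j w = true ↔ ∀ t (h : t < w.length), Q (j + t) w[t] = true := by
  induction w generalizing j with
  | nil => simp [pvMatchKey]
  | cons c w ih =>
    simp only [pvMatchKey, Bool.and_eq_true, ih]
    constructor
    · rintro ⟨h0, hrest⟩ t ht
      cases t with
      | zero => simpa using h0
      | succ t =>
        have := hrest t (by simpa using ht)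
        simpa [add_assoc, add_comm 1 (t : Int)] using this
    · intro h
      refine ⟨by simpa using h 0 (by simp), fun t ht => ?_⟩
      have := h (t + 1) (by simpa using ht)
      simpa [add_assoc, add_comm 1 (t : Int)] using this

-- find? over the product list, one block per first letter
lemma pv_find_flatMap (as : List Char) (keys : List (List Char)) (Q : Int → Char → Bool) (j : Int) :
    (as.flatMap (fun c => keys.map (c :: ·))).find? (pvMatchKey Q j)
      = match keys.find? (pvMatchKey Q (j + 1)) with
        | none => none
        | some w => (as.find? (Q j)).map (· :: w) := by
  induction as with
  | nil => cases keys.find? (pvMatchKey Q (j + 1)) <;> simp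
  | cons a as ih =>
    simp only [List.flatMap_cons, List.find?_append, List.find?_map, ih]
    by_cases ha : Q j a = true
    · simp only [Function.comp_def, pvMatchKey, ha, Bool.true_and]
      cases hk : keys.find? (pvMatchKey Q (j + 1)) with
      | none => simp
      | some w => simp [ha]
    · have ha' : Q j a = false := by simpa using ha
      simp only [Function.comp_def, pvMatchKey, ha', Bool.false_and]
      have hnone : (keys.find? fun _ => false) = none := by
        simp [List.find?_eq_none]
      cases hk : keys.find? (pvMatchKey Q (j + 1)) with
      | none => simp [hnone]
      | some w => simp [hnone, ha']

-- find? over the full product = position-by-position first fit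
lemma pv_find_allKeys (Q : Int → Char → Bool) (L : Nat) (j : Int) :
    (pvAllKeys L).find? (pvMatchKey Q j)
      = pvBuildKeyQ Q (PySem.List.pyRange j (j + L) 1) := by
  induction L generalizing j with
  | zero =>
    rw [PySem.List.pyRange_one_eq_nil (by omega)]
    simp [pvAllKeys, pvBuildKeyQ, pvMatchKey]
  | succ L ih =>
    rw [show (j + (L + 1 : Nat) : Int) = (j + 1) + L by push_cast; ring,
      PySem.List.pyRange_one_cons (by omega)]
    show (pvAlphabet.flatMap (fun c => (pvAllKeys L).map (c :: ·))).find? (pvMatchKey Q j) = _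
    rw [pv_find_flatMap, ih]
    simp only [pvBuildKeyQ]
    cases pvBuildKeyQ Q (PySem.List.pyRange (j + 1) (j + 1 + L) 1) with
    | none => cases pvAlphabet.find? (Q j) <;> simp
    | some w => cases pvAlphabet.find? (Q j) <;> simp

-- every value a class can contain is a shift value: 0 ≤ s < 26
lemma pv_class_bounds {shifts : List Int} (hsh : ∀ s ∈ shifts, 0 ≤ s ∧ s < 26)
    {n L j s : Int} (h : s ∈ pvClass shifts n L j) : 0 ≤ s ∧ s < 26 := by
  rcases List.mem_map.1 h with ⟨i, -, rfl⟩
  by_cases hi : PySem.Raise.InRange shifts.length i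
  · exact hsh _ (PySem.List.pyGetD_mem shifts 0 hi)
  · rw [PySem.List.pyGetD_of_none shifts i 0 ((PySem.List.pyGet?_eq_none_iff shifts i).2 hi)]
    norm_num

-- first alphabet character satisfying Q j  =  B's class resolution
lemma pv_find_alpha_eq_classChar {shifts : List Int} (hsh : ∀ s ∈ shifts, 0 ≤ s ∧ s < 26)
    (n L j : Int) :
    pvAlphabet.find? (pvQ shifts n L j) = pvClassChar (pvClass shifts n L j) := by
  cases hcls : pvClass shifts n L j with
  | nil =>
    have hQ : pvQ shifts n L j 'A' = true := by simp [pvQ, hcls]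
    show (('A' :: _).find? _) = _
    rw [List.find?_cons_of_pos hQ]
    simp [pvClassChar]
  | cons s0 rest =>
    by_cases hall : (s0 :: rest).all (fun s => s == s0) = true
    · have hs0 : 0 ≤ s0 ∧ s0 < 26 :=
        pv_class_bounds hsh (n := n) (L := L) (j := j) (by rw [hcls]; simp)
      have hconst : ∀ x ∈ s0 :: rest, x = s0 := by
        rw [List.all_eq_true] at hall
        intro x hx; exact beq_iff_eq.1 (hall x hx)
      have hq : ∀ c ∈ pvAlphabet, pvQ shifts n L j c = (((c.toNat : Int) - 65) == s0) := by
        intro c _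
        simp only [pvQ, hcls]
        rw [Bool.eq_iff_iff, List.all_eq_true]
        constructor
        · intro h; exact h s0 (by simp)
        · intro h x hx
          rw [beq_iff_eq] at h ⊢
          rw [hconst x hx]; exact h
      rw [pv_find?_congr hq]
      simp only [pvClassChar, hall, if_true]
      obtain ⟨h0, h1⟩ := hs0
      interval_cases s0 <;> decide
    · simp only [pvClassChar, hall, Bool.false_eq_true, if_false]
      apply List.find?_eq_none.2
      intro c _ hc
      simp only [pvQ, hcls, List.all_eq_true] at hc
      obtain ⟨x, hx, hxne⟩ : ∃ x ∈ s0 :: rest, x ≠ s0 := by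
        simpa [List.all_eq_true] using hall
      have h1 := beq_iff_eq.1 (hc s0 (by simp))
      have h2 := beq_iff_eq.1 (hc x hx)
      omega

lemma pv_shifts_bounds (filtered ep : List Char) :
    ∀ x ∈ pvShifts filtered ep, 0 ≤ x ∧ x < 26 := by
  intro x hx
  rcases List.mem_map.1 hx with ⟨q, -, rfl⟩
  exact ⟨PySem.Int.mod_nonneg _ (by norm_num), PySem.Int.mod_lt _ (by norm_num)⟩

lemma pv_shifts_length (filtered ep : List Char) (hm : ep.length = filtered.length) :
    (pvShifts filtered ep).length = filtered.length := by
  simp [pvShifts, List.length_zip, hm]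

lemma pv_shift_at (s : String) (ep : List Char) (hm : ep.length = (pvFiltered s).length)
    {i : Nat} (hi : i < (pvFiltered s).length) :
    PySem.List.pyGetD (pvShifts (pvFiltered s) ep) (i : Int) 0
      = PySem.Int.mod (((pvFiltered s)[i].toNat : Int) - ((ep[i]'(by omega)).toNat : Int)) 26 := by
  rw [PySem.List.pyGetD_natCast,
    List.getD_eq_getElem _ _ (by rw [pv_shifts_length _ _ hm]; exact hi)]
  simp [pvShifts, List.getElem_zip]

-- on product members, the decryption test is exactly the class-wise predicate
lemma pv_pred_eq_matchKey (s : String) (ep : List Char)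
    (hup : ∀ p ∈ ep, 'A' ≤ p ∧ p ≤ 'Z')
    (hm : ep.length = (pvFiltered s).length)
    (L : Nat) (hL : 0 < L) (w : List Char) (hw : w ∈ pvAllKeys L) :
    (pvDecrypt s (String.ofList w) == ep)
      = pvMatchKey (pvQ (pvShifts (pvFiltered s) ep) ((pvFiltered s).length : Int) (L : Int)) 0 w := by
  obtain ⟨hwlen, hwal⟩ := pv_mem_allKeys hw
  have hupperw : PySem.Chars.upper (String.ofList w).toList = w := by
    rw [show (String.ofList w).toList = w by simp]
    exact pv_upper_alphabet hwal
  have hLZ : (0:Int) < (L:Int) := by exact_mod_cast hL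
  have hdec : pvDecrypt s (String.ofList w) =
      (List.range (pvFiltered s).length).map
        (fun i => pvDecChar ((pvFiltered s).getD i 'A') (w.getD (i % L) 'A')) := by
    unfold pvDecrypt
    rw [hupperw, hwlen]
  -- pointwise characterization of one position
  have hpoint : ∀ i (hi : i < (pvFiltered s).length) (t : Nat) (htw : t < w.length)
      (hmod : i % L = t),
      (pvDecChar ((pvFiltered s).getD i 'A') (w.getD (i % L) 'A') = ep[i]'(by omega)) ↔
        (((w[t]'htw).toNat : Int) - 65
          = PySem.List.pyGetD (pvShifts (pvFiltered s) ep) (i : Int) 0) := by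
    intro i hi t htw hmod
    subst hmod
    have hiL : i % L < w.length := htw
    rw [List.getD_eq_getElem _ _ hi, List.getD_eq_getElem _ _ hiL, pv_shift_at s ep hm hi]
    have hkb := pv_alphabet_range (hwal _ (List.getElem_mem hiL))
    have hpb : 65 ≤ (ep[i]'(by omega)).toNat ∧ (ep[i]'(by omega)).toNat ≤ 90 := by
      have := hup _ (List.getElem_mem (show i < ep.length by omega))
      rw [pv_le_char_iff, pv_le_char_iff] at this
      exact this
    exact pv_decChar_eq_iff hkb hpb
  rw [hdec, Bool.eq_iff_iff, beq_iff_eq, pv_matchKey_iff]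
  constructor
  · intro heq t ht
    have htL : t < L := by rw [← hwlen]; exact ht
    simp only [pvQ, zero_add, List.all_eq_true]
    intro sv hsv
    rw [beq_iff_eq]
    rcases List.mem_map.1 hsv with ⟨iZ, hiZ, rfl⟩
    rw [PySem.List.mem_pyRange_iff_of_pos hLZ] at hiZ
    obtain ⟨hge, hlt, hdvd⟩ := hiZ
    obtain ⟨q, hq⟩ := hdvd
    have hq0 : 0 ≤ q := by
      have hLq : 0 ≤ (L:Int) * q := by omega
      by_contra hneg
      rw [not_le] at hneg
      nlinarith
    have hiZ0 : 0 ≤ iZ := by omega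
    set i : Nat := iZ.toNat with hidef
    have hic : (i : Int) = iZ := Int.toNat_of_nonneg hiZ0
    have hin : i < (pvFiltered s).length := by omega
    have himod : i % L = t := by
      have hqn : ((L : Int)) * ((q.toNat : Int)) = (L : Int) * q := by
        rw [Int.toNat_of_nonneg hq0]
      have : i = t + L * q.toNat := by omega
      rw [this, Nat.add_mul_mod_self_left]
      exact Nat.mod_eq_of_lt htL
    have hval := (hpoint i hin t ht himod).1 (by
      have h1 := List.getElem_of_eq heq (by simpa using hin)
      simpa using h1)
    rw [hic] at hval
    exact hval
  · intro hQ
    apply List.ext_getElem (by simp [hm])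
    intro i h1 h2
    have hin : i < (pvFiltered s).length := by simpa using h1
    simp only [List.getElem_map, List.getElem_range]
    apply (hpoint i hin (i % L) (by rw [hwlen]; exact Nat.mod_lt _ hL) rfl).2
    have ht : i % L < w.length := by rw [hwlen]; exact Nat.mod_lt _ hL
    have hQt := hQ (i % L) ht
    simp only [pvQ, zero_add, List.all_eq_true] at hQt
    have hmem : PySem.List.pyGetD (pvShifts (pvFiltered s) ep) (i : Int) 0
        ∈ pvClass (pvShifts (pvFiltered s) ep) ((pvFiltered s).length : Int) (L : Int) ((i % L : Nat) : Int) := by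
      apply List.mem_map.2
      refine ⟨(i : Int), ?_, rfl⟩
      rw [PySem.List.mem_pyRange_iff_of_pos hLZ]
      refine ⟨by exact_mod_cast Nat.mod_le i L, by exact_mod_cast hin, ⟨(i / L : Nat), ?_⟩⟩
      have hthis : ((L : Int)) * ((i / L : Nat) : Int) + ((i % L : Nat) : Int) = (i : Int) := by
        exact_mod_cast Nat.div_add_mod i L
      linarith [hthis]
    have := hQt _ hmem
    rwa [beq_iff_eq] at this

lemma pv_buildKeyQ_eq_buildKey {shifts : List Int} (hsh : ∀ s ∈ shifts, 0 ≤ s ∧ s < 26)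
    (n L : Int) : ∀ js, pvBuildKeyQ (pvQ shifts n L) js = pvBuildKey shifts n L js := by
  intro js
  induction js with
  | nil => rfl
  | cons j js ih =>
    simp only [pvBuildKeyQ, pvBuildKey, pv_find_alpha_eq_classChar hsh n L j, ih]

-- the per-length step: A's scan of all 26^L keys = B's direct construction
lemma pv_perLen (s : String) (ep : List Char)
    (hup : ∀ p ∈ ep, 'A' ≤ p ∧ p ≤ 'Z')
    (hm : ep.length = (pvFiltered s).length)
    (L : Int) (hL : 1 ≤ L) :
    ((pvAllKeys L.toNat).find? (fun w => pvDecrypt s (String.ofList w) == ep))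
      = pvBuildKey (pvShifts (pvFiltered s) ep) ((pvFiltered s).length : Int) L
          (PySem.List.pyRange 0 L 1) := by
  have hLt : 0 < L.toNat := by omega
  have hcast : ((L.toNat : Int)) = L := Int.toNat_of_nonneg (by omega)
  rw [pv_find?_congr (fun w hw => pv_pred_eq_matchKey s ep hup hm L.toNat hLt w hw)]
  rw [pv_find_allKeys, hcast, zero_add]
  exact pv_buildKeyQ_eq_buildKey (pv_shifts_bounds _ _) _ L _

-- the length loop, main case
lemma pv_loopA (s ep' : String)
    (hup : ∀ p ∈ ep'.toList, 'A' ≤ p ∧ p ≤ 'Z')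
    (hm : ep'.toList.length = (pvFiltered s).length) :
    ∀ (fuel : Nat) (l : Int), 1 ≤ l →
      pvTryLenA s ep' l fuel
        = (pvTryLenB (pvShifts (pvFiltered s) ep'.toList) ((pvFiltered s).length : Int)
            (PySem.List.pyRange l (l + fuel) 1)).map String.ofList := by
  intro fuel
  induction fuel with
  | zero =>
    intro l hl
    rw [show l + ((0 : Nat) : Int) = l by simp, PySem.List.pyRange_one_eq_nil le_rfl]
    rfl
  | succ f ih =>
    intro l hl
    rw [show l + ((f + 1 : Nat) : Int) = (l + 1) + (f : Nat) by push_cast; ring,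
      PySem.List.pyRange_one_cons (by omega)]
    simp only [pvTryLenA, pvTryLenB]
    rw [pv_perLen s ep'.toList hup hm l hl]
    cases pvBuildKey (pvShifts (pvFiltered s) ep'.toList) ((pvFiltered s).length : Int) l
        (PySem.List.pyRange 0 l 1) with
    | some k => rfl
    | none => exact ih (l + 1) (by omega)

-- when the quick checks fail, A finds no key at any length
lemma pv_A_none (s ep' : String)
    (hfail : ∀ w : List Char, ¬ (pvDecrypt s (String.ofList w) == ep'.toList) = true) :
    ∀ (fuel : Nat) (l : Int), pvTryLenA s ep' l fuel = none := by
  intro fuel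
  induction fuel with
  | zero => intro l; rfl
  | succ f ih =>
    intro l
    simp only [pvTryLenA]
    rw [List.find?_eq_none.2 (fun w _ => hfail w)]
    exact ih (l + 1)

lemma pv_classChar_isSome_of_const {cls : List Int} {v : Int} (h : ∀ s ∈ cls, s = v) :
    (pvClassChar cls).isSome := by
  cases cls with
  | nil => simp [pvClassChar]
  | cons s0 r =>
    have h0 : s0 = v := h s0 (by simp)
    have hall : (s0 :: r).all (fun s => s == s0) = true := by
      rw [List.all_eq_true]
      intro x hx; rw [beq_iff_eq, h x hx, h0]
    simp [pvClassChar, hall]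

lemma pv_buildKey_isSome {sh : List Int} {n L : Int} :
    ∀ js, (∀ j ∈ js, (pvClassChar (pvClass sh n L j)).isSome) →
      (pvBuildKey sh n L js).isSome := by
  intro js
  induction js with
  | nil => intro _; simp [pvBuildKey]
  | cons j js ih =>
    intro h
    have h0 := h j (by simp)
    cases hc : pvClassChar (pvClass sh n L j) with
    | none => rw [hc] at h0; simp at h0
    | some c =>
      have hrest := ih (fun x hx => h x (by simp [hx]))
      cases hb : pvBuildKey sh n L js with
      | none => rw [hb] at hrest; simp at hrest
      | some ks => simp [pvBuildKey, hc, hb]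

lemma pv_tryB_isSome {sh : List Int} {n : Int} :
    ∀ (js : List Int) (L0 : Int), L0 ∈ js →
      (pvBuildKey sh n L0 (PySem.List.pyRange 0 L0 1)).isSome →
      (pvTryLenB sh n js).isSome := by
  intro js
  induction js with
  | nil => intro L0 h; simp at h
  | cons j js ih =>
    intro L0 hmem hsome
    rcases List.mem_cons.1 hmem with rfl | hmem'
    · cases hb : pvBuildKey sh n L0 (PySem.List.pyRange 0 L0 1) with
      | none => rw [hb] at hsome; simp at hsome
      | some k => simp [pvTryLenB, hb]
    · cases hb : pvBuildKey sh n j (PySem.List.pyRange 0 j 1) with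
      | some k => simp [pvTryLenB, hb]
      | none => simpa [pvTryLenB, hb] using ih L0 hmem' hsome

lemma pv_tryB_append (sh : List Int) (n : Int) (l1 l2 : List Int) :
    pvTryLenB sh n (l1 ++ l2)
      = match pvTryLenB sh n l1 with
        | some k => some k
        | none => pvTryLenB sh n l2 := by
  induction l1 with
  | nil => simp [pvTryLenB]
  | cons j l1 ih =>
    simp only [List.cons_append, pvTryLenB]
    cases pvBuildKey sh n j (PySem.List.pyRange 0 j 1) <;> simp [ih]

-- every class of the full-length key is constant, so B is guaranteed a hit at L = n (or L = 1 if n = 0)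
lemma pv_class_const {sh : List Int} {n j : Int} (hn : 0 < n) (hj : 0 ≤ j) :
    ∀ s ∈ pvClass sh n n j, s = PySem.List.pyGetD sh j 0 := by
  intro s hs
  rcases List.mem_map.1 hs with ⟨i, hi, rfl⟩
  rw [PySem.List.mem_pyRange_iff_of_pos hn] at hi
  obtain ⟨h1, h2, hdvd⟩ := hi
  have hz : i - j = 0 := by
    have hmod := Int.emod_eq_zero_of_dvd hdvd
    rw [Int.emod_eq_of_lt (by omega) (by omega)] at hmod
    exact hmod
  have : i = j := by omega
  rw [this]

lemma pv_hit (sh : List Int) (n x : Int)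
    (hx : x = if 0 < n then n else 1) (hn : 0 ≤ n) :
    (pvBuildKey sh n x (PySem.List.pyRange 0 x 1)).isSome := by
  apply pv_buildKey_isSome
  intro j hj
  rw [PySem.List.mem_pyRange_one] at hj
  by_cases hn0 : 0 < n
  · rw [hx, if_pos hn0]
    exact pv_classChar_isSome_of_const (pv_class_const hn0 hj.1)
  · have hn' : n = 0 := by omega
    have : pvClass sh n x j = [] := by
      unfold pvClass
      rw [hn', PySem.List.pyRange_of_pos _ _ (show (0:Int) < x by rw [hx, if_neg hn0]; norm_num)]
      rw [if_neg (by omega)]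
      simp
    rw [this]
    simp [pvClassChar]

-- ===== VERDICT (by name: the statement is the Claim_ definition above) =====
theorem brute_force_poly_alphabetic_cipher_spec : Claim_equal_brute_force_poly_alphabetic_cipher := by
  intro s ep' maxL _
  unfold Spec_brute_force_poly_alphabetic_cipher
  unfold brute_force_poly_alphabetic_cipher brute_force_poly_alphabetic_cipher_alt
  by_cases hguard : (ep'.toList.length = (pvFiltered s).length ∧ ∀ p ∈ ep'.toList, 'A' ≤ p ∧ p ≤ 'Z')
  · rw [if_pos hguard]
    obtain ⟨hm, hup⟩ := hguard
    rw [pv_loopA s ep' hup hm maxL.toNat 1 le_rfl]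
    by_cases hmax : maxL ≤ 0
    · rw [show (1 + (maxL.toNat : Int)) = 1 by omega, PySem.List.pyRange_one_eq_nil le_rfl,
        PySem.List.pyRange_one_eq_nil (by
          have := min_le_left maxL (if 0 < (pvFiltered s).length then ((pvFiltered s).length : Int) else 1)
          omega)]
    · rw [not_le] at hmax
      rw [show (1 + (maxL.toNat : Int)) = maxL + 1 by omega]
      by_cases hcmp : maxL ≤ (if 0 < (pvFiltered s).length then ((pvFiltered s).length : Int) else 1)
      · rw [min_eq_left hcmp]
      · rw [not_le] at hcmp
        rw [min_eq_right (le_of_lt hcmp)]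
        have hx1 : 1 ≤ (if 0 < (pvFiltered s).length then ((pvFiltered s).length : Int) else 1) := by
          split <;> omega
        rw [PySem.List.pyRange_one_append 1
            ((if 0 < (pvFiltered s).length then ((pvFiltered s).length : Int) else 1) + 1) (maxL + 1)
            (by omega) (by omega),
          pv_tryB_append]
        have hxeq : (if 0 < (pvFiltered s).length then ((pvFiltered s).length : Int) else 1)
            = (if 0 < ((pvFiltered s).length : Int) then ((pvFiltered s).length : Int) else 1) := by
          by_cases h : 0 < (pvFiltered s).length
          · rw [if_pos h, if_pos (by exact_mod_cast h)]
          · rw [if_neg h, if_neg (by exact_mod_cast h)]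
        have hhit := pv_hit (pvShifts (pvFiltered s) ep'.toList) ((pvFiltered s).length : Int)
          (if 0 < (pvFiltered s).length then ((pvFiltered s).length : Int) else 1)
          hxeq (by positivity)
        have hsome := pv_tryB_isSome
          (PySem.List.pyRange 1 ((if 0 < (pvFiltered s).length then ((pvFiltered s).length : Int) else 1) + 1) 1)
          (if 0 < (pvFiltered s).length then ((pvFiltered s).length : Int) else 1)
          (by rw [PySem.List.mem_pyRange_one]; omega) hhit
        obtain ⟨k, hk⟩ := Option.isSome_iff_exists.1 hsome
        rw [hk]
  · rw [if_neg hguard]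
    have hfail : ∀ w : List Char, ¬ (pvDecrypt s (String.ofList w) == ep'.toList) = true := by
      intro w hw
      rw [beq_iff_eq] at hw
      by_cases hlen : ep'.toList.length = (pvFiltered s).length
      · apply hguard
        refine ⟨hlen, ?_⟩
        intro p hp
        rcases List.mem_iff_getElem.1 hp with ⟨i0, hi0, rfl⟩
        have hdecb := pv_decChar_upper ((pvFiltered s).getD i0 'A')
          ((PySem.Chars.upper (String.ofList w).toList).getD
            (i0 % (PySem.Chars.upper (String.ofList w).toList).length) 'A')
        have hi0' : i0 < (pvFiltered s).length := by omega
        have hval : (pvDecrypt s (String.ofList w))[i0]'(by simp [pvDecrypt]; omega)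
            = pvDecChar ((pvFiltered s).getD i0 'A')
              ((PySem.Chars.upper (String.ofList w).toList).getD
                (i0 % (PySem.Chars.upper (String.ofList w).toList).length) 'A') := by
          simp [pvDecrypt]
        have hgg := List.getElem_of_eq hw (show i0 < (pvDecrypt s (String.ofList w)).length by
          simp [pvDecrypt]; omega)
        rw [hval] at hgg
        have hA : ('A').toNat = 65 := rfl
        have hZ : ('Z').toNat = 90 := rfl
        rw [pv_le_char_iff, pv_le_char_iff, ← hgg, hA, hZ]
        constructor <;> omega
      · apply hlen
        rw [← hw]
        simp [pvDecrypt]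
    rw [pv_A_none s ep' hfail]
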